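-- pv_equiv track=rewrite | github.com/waylen888/travel-planner-skills | navigator/scripts/navigator.py | insert_meal_slots
-- ===== SOURCE A (Python) =====
-- MEAL_DURATION_MIN = 60
--
-- LUNCH_WINDOW = (720, 780)   # 12:00-13:00
--
-- DINNER_WINDOW = (1080, 1140) # 18:00-19:00
--
-- def parse_time(s):
--     """Parse "HH:MM" to minutes since midnight. Returns None on failure."""
--     s = s.strip()
--     if not s:
--         return None
--     parts = s.split(":")
--     if len(parts) != 2:
--         return None
--     try:
--         return int(parts[0]) * 60 + int(parts[1])
--     except ValueError:
--         return None
--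
-- def format_time(minutes):
--     """Convert minutes since midnight to "HH:MM"."""
--     h = minutes // 60
--     m = minutes % 60
--     return f"{h:02d}:{m:02d}"
--
-- def time_slot_str(start_min, end_min):
--     """Format a time slot as "HH:MM-HH:MM"."""
--     return f"{format_time(start_min)}-{format_time(end_min)}"
--
-- def insert_meal_slots(ordered_pois, day_start_min, day_end_min):
--     """
--     Insert placeholder meal breaks where gaps overlap lunch/dinner windows.
--     Returns list of meal dicts with time_slot.
--     """
--     meals = []
--
--     def check_window(window_start, window_end, label, meal_type):
--         """Check if there's room for a meal in the given window."""
--         # Find what's happening during this window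
--         for poi in ordered_pois:
--             ts = poi.get("time_slot", "")
--             if "-" in ts:
--                 parts = ts.split("-")
--                 ps = parse_time(parts[0])
--                 pe = parse_time(parts[1])
--                 if ps is not None and pe is not None:
--                     # POI overlaps meal window entirely
--                     if ps <= window_start and pe >= window_end:
--                         return
--         # Find the best gap for the meal
--         best_start = window_start
--         meals.append({
--             "type": meal_type,
--             "time_slot": time_slot_str(best_start, best_start + MEAL_DURATION_MIN),
--             "name": "",
--             "name_local": ""
--         })
--
--     check_window(LUNCH_WINDOW[0], LUNCH_WINDOW[1], "Lunch Break", "lunch")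
--     check_window(DINNER_WINDOW[0], DINNER_WINDOW[1], "Dinner Break", "dinner")
--
--     return meals
-- ===== SOURCE B (Python) =====
-- def _parse_hm(s):
--     """Parse "HH:MM" to minutes since midnight; None on failure."""
--     try:
--         h, m = s.strip().split(":")
--         return int(h) * 60 + int(m)
--     except ValueError:
--         return None
--
-- def insert_meal_slots(ordered_pois, day_start_min, day_end_min):
--     lunch_covered = False
--     dinner_covered = False
--     for poi in ordered_pois:
--         ts = poi.get("time_slot", "")
--         if "-" not in ts:
--             continue
--         parts = ts.split("-")
--         ps = _parse_hm(parts[0])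
--         pe = _parse_hm(parts[1])
--         if ps is None or pe is None:
--             continue
--         if ps <= 720 and pe >= 780:
--             lunch_covered = True
--         if ps <= 1080 and pe >= 1140:
--             dinner_covered = True
--     meals = []
--     if not lunch_covered:
--         meals.append({"type": "lunch", "time_slot": "12:00-13:00",
--                       "name": "", "name_local": ""})
--     if not dinner_covered:
--         meals.append({"type": "dinner", "time_slot": "18:00-19:00",
--                       "name": "", "name_local": ""})
--     return meals
-- ===== Notes on version B (the rewrite author's own statement) =====
-- stated objective: simpler
-- what changed: B replaces A's two separate full scans (one closure call per meal window, each re-parsing every POI's time_slot) with a single pass over ordered_pois that parses each time_slot once and maintains two coverage flags, then appends the lunch and dinner meal dicts from the flags.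
import Mathlib
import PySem

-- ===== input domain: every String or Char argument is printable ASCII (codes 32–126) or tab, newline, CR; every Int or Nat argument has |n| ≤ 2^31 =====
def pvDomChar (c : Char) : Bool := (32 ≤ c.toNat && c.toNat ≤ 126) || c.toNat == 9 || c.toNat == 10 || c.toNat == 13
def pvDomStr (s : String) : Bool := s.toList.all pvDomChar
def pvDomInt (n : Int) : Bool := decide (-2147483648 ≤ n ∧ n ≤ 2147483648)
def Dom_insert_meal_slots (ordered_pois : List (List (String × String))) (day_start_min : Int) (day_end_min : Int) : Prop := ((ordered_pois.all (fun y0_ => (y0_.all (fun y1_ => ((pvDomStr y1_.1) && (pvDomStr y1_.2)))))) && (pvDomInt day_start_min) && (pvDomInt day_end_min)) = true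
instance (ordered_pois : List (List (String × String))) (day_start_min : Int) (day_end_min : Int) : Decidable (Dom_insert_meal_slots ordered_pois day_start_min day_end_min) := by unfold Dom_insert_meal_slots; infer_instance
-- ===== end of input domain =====

-- B replaces A's two separate full scans (one per meal window) by a single pass over
-- ordered_pois maintaining two coverage flags (objective: simpler, same asymptotic cost).


-- ===== PORT A =====
-- s.split(sep) for a non-empty literal sep, via the Chars primitive (exact)
def pySplit (s sep : String) : List String :=
  (PySem.Chars.splitOn s.toList sep.toList).map String.ofList

-- parse_time: strip, require exactly two ':'-parts, int() each
def parse_time (s : String) : Option Int :=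
  let s := PySem.Str.strip s
  if s = "" then none
  else
    let parts := pySplit s ":"
    if parts.length ≠ 2 then none
    else
      match PySem.Int.ofStr? (PySem.List.pyGetD parts 0 ""), PySem.Int.ofStr? (PySem.List.pyGetD parts 1 "") with
      | some a, some b => some (a * 60 + b)
      | _, _ => none

-- format_time: f"{h:02d}:{m:02d}"; the f-string field {x:02d} is exactly str(x).zfill(2)
def format_time (minutes : Int) : String :=
  let h := PySem.Int.floordiv minutes 60
  let m := PySem.Int.mod minutes 60
  String.ofList ((PySem.Str.zfill (PySem.Int.toStr h) 2).toList ++ ':' :: (PySem.Str.zfill (PySem.Int.toStr m) 2).toList)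

def time_slot_str (start_min end_min : Int) : String :=
  String.ofList ((format_time start_min).toList ++ '-' :: (format_time end_min).toList)

-- the loop body of check_window: early return (covered) or continue
def checkWindowCovered (ordered_pois : List (List (String × String))) (window_start window_end : Int) : Bool :=
  match ordered_pois with
  | [] => false
  | poi :: rest =>
    let ts := PySem.Dict.getD ⟨poi⟩ "time_slot" ""
    if PySem.Str.isIn "-" ts then
      let parts := pySplit ts "-"
      match parse_time (PySem.List.pyGetD parts 0 ""), parse_time (PySem.List.pyGetD parts 1 "") with
      | some ps, some pe =>
        if ps ≤ window_start && pe ≥ window_end then true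
        else checkWindowCovered rest window_start window_end
      | _, _ => checkWindowCovered rest window_start window_end
    else checkWindowCovered rest window_start window_end

def mealDictA (meal_type : String) (best_start : Int) : List (String × String) :=
  [("type", meal_type), ("time_slot", time_slot_str best_start (best_start + 60)),
   ("name", ""), ("name_local", "")]

def insert_meal_slots (ordered_pois : List (List (String × String))) (day_start_min : Int) (day_end_min : Int) : List (List (String × String)) :=
  let meals0 : List (List (String × String)) := []
  let meals1 := if checkWindowCovered ordered_pois 720 780 then meals0 else meals0 ++ [mealDictA "lunch" 720]
  let meals2 := if checkWindowCovered ordered_pois 1080 1140 then meals1 else meals1 ++ [mealDictA "dinner" 1080]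
  meals2

-- ===== PORT B =====
-- _parse_hm: strip, split on ':', succeed only on exactly two int()-able parts
def parse_hm_alt (s : String) : Option Int :=
  match pySplit (PySem.Str.strip s) ":" with
  | [h, m] =>
    match PySem.Int.ofStr? h, PySem.Int.ofStr? m with
    | some a, some b => some (a * 60 + b)
    | _, _ => none
  | _ => none

-- one step of B's single loop: update both flags from one POI
def stepB (acc : Bool × Bool) (poi : List (String × String)) : Bool × Bool :=
  let ts := PySem.Dict.getD ⟨poi⟩ "time_slot" ""
  if PySem.Str.isIn "-" ts then
    let parts := pySplit ts "-"
    match parse_hm_alt (PySem.List.pyGetD parts 0 ""), parse_hm_alt (PySem.List.pyGetD parts 1 "") with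
    | some ps, some pe =>
      (acc.1 || (ps ≤ 720 && pe ≥ 780), acc.2 || (ps ≤ 1080 && pe ≥ 1140))
    | _, _ => acc
  else acc

def insert_meal_slots_alt (ordered_pois : List (List (String × String))) (day_start_min : Int) (day_end_min : Int) : List (List (String × String)) :=
  let flags := ordered_pois.foldl stepB (false, false)
  (if flags.1 then [] else [[("type", "lunch"), ("time_slot", "12:00-13:00"), ("name", ""), ("name_local", "")]]) ++
  (if flags.2 then [] else [[("type", "dinner"), ("time_slot", "18:00-19:00"), ("name", ""), ("name_local", "")]])

-- ===== PRECONDITION & SPEC =====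
def Spec_insert_meal_slots (ordered_pois : List (List (String × String))) (day_start_min : Int) (day_end_min : Int) (out : List (List (String × String))) : Prop := out = insert_meal_slots_alt ordered_pois day_start_min day_end_min
instance (ordered_pois : List (List (String × String))) (day_start_min : Int) (day_end_min : Int) (out : List (List (String × String))) : Decidable (Spec_insert_meal_slots ordered_pois day_start_min day_end_min out) := by unfold Spec_insert_meal_slots; infer_instance

-- ===== CLAIM (what is proved, stated in full; the proofs are below) =====
def Claim_equal_insert_meal_slots : Prop := ∀ (ordered_pois : List (List (String × String))) (day_start_min : Int) (day_end_min : Int), Dom_insert_meal_slots ordered_pois day_start_min day_end_min → Spec_insert_meal_slots ordered_pois day_start_min day_end_min (insert_meal_slots ordered_pois day_start_min day_end_min)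

-- ===== LEMMAS AND PROOFS =====

-- A's parse_time equals B's _parse_hm on every string
theorem pyGetD_pair1 (a b : String) : PySem.List.pyGetD [a, b] 1 "" = b := rfl

theorem parse_hm_alt_eq (s : String) : parse_hm_alt s = parse_time s := by
  by_cases h : PySem.Str.strip s = ""
  · rw [parse_hm_alt, parse_time, h]
    decide
  · simp only [parse_hm_alt, parse_time, if_neg h]
    cases hl : pySplit (PySem.Str.strip s) ":" with
    | nil => simp
    | cons a t =>
      cases t with
      | nil => simp
      | cons b t2 =>
        cases t2 with
        | nil => simp [pyGetD_pair1]
        | cons c t3 => simp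

-- unfolding equations, stated once so the induction below can rewrite with them
theorem cwc_nil (ws we : Int) : checkWindowCovered [] ws we = false := rfl

theorem cwc_cons (poi : List (String × String)) (rest : List (List (String × String))) (ws we : Int) :
    checkWindowCovered (poi :: rest) ws we =
      (if PySem.Str.isIn "-" (PySem.Dict.getD ⟨poi⟩ "time_slot" "") then
        match parse_time (PySem.List.pyGetD (pySplit (PySem.Dict.getD ⟨poi⟩ "time_slot" "") "-") 0 ""),
              parse_time (PySem.List.pyGetD (pySplit (PySem.Dict.getD ⟨poi⟩ "time_slot" "") "-") 1 "") with
        | some ps, some pe =>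
          if ps ≤ ws && pe ≥ we then true else checkWindowCovered rest ws we
        | _, _ => checkWindowCovered rest ws we
      else checkWindowCovered rest ws we) := rfl

theorem stepB_eq (acc : Bool × Bool) (poi : List (String × String)) :
    stepB acc poi =
      (if PySem.Str.isIn "-" (PySem.Dict.getD ⟨poi⟩ "time_slot" "") then
        match parse_hm_alt (PySem.List.pyGetD (pySplit (PySem.Dict.getD ⟨poi⟩ "time_slot" "") "-") 0 ""),
              parse_hm_alt (PySem.List.pyGetD (pySplit (PySem.Dict.getD ⟨poi⟩ "time_slot" "") "-") 1 "") with
        | some ps, some pe =>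
          (acc.1 || (ps ≤ 720 && pe ≥ 780), acc.2 || (ps ≤ 1080 && pe ≥ 1140))
        | _, _ => acc
      else acc) := rfl

-- loop invariant: B's fold computes (lc ∨ lunch-covered, dc ∨ dinner-covered)
theorem foldl_stepB (pois : List (List (String × String))) (lc dc : Bool) :
    pois.foldl stepB (lc, dc) =
      (lc || checkWindowCovered pois 720 780, dc || checkWindowCovered pois 1080 1140) := by
  induction pois generalizing lc dc with
  | nil => simp [cwc_nil]
  | cons poi rest ih =>
    rw [List.foldl_cons, stepB_eq, cwc_cons, cwc_cons]
    by_cases hin : PySem.Str.isIn "-" (PySem.Dict.getD ⟨poi⟩ "time_slot" "") = true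
    · rw [if_pos hin, if_pos hin, if_pos hin]
      simp only [parse_hm_alt_eq]
      cases hp : parse_time (PySem.List.pyGetD (pySplit (PySem.Dict.getD ⟨poi⟩ "time_slot" "") "-") 0 "") with
      | none => exact ih lc dc
      | some ps =>
        cases hq : parse_time (PySem.List.pyGetD (pySplit (PySem.Dict.getD ⟨poi⟩ "time_slot" "") "-") 1 "") with
        | none => exact ih lc dc
        | some pe =>
          rw [ih]
          generalize checkWindowCovered rest 720 780 = cl
          generalize checkWindowCovered rest 1080 1140 = cd
          by_cases h1 : (ps ≤ 720 && pe ≥ 780) = true <;>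
            by_cases h2 : (ps ≤ 1080 && pe ≥ 1140) = true <;>
            simp [h1, h2, Bool.or_comm]
    · rw [if_neg hin, if_neg hin, if_neg hin]
      exact ih lc dc

-- A's meal dicts evaluate to B's literal dicts
theorem mealDictA_lunch : mealDictA "lunch" 720 = [("type", "lunch"), ("time_slot", "12:00-13:00"), ("name", ""), ("name_local", "")] := by decide
theorem mealDictA_dinner : mealDictA "dinner" 1080 = [("type", "dinner"), ("time_slot", "18:00-19:00"), ("name", ""), ("name_local", "")] := by decide

-- ===== VERDICT (by name: the statement is the Claim_ definition above) =====
theorem insert_meal_slots_spec : Claim_equal_insert_meal_slots := by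
  intro ordered_pois day_start_min day_end_min _
  unfold Spec_insert_meal_slots insert_meal_slots insert_meal_slots_alt
  rw [foldl_stepB]
  simp only [Bool.false_or]
  by_cases h1 : checkWindowCovered ordered_pois 720 780 = true <;>
    by_cases h2 : checkWindowCovered ordered_pois 1080 1140 = true <;>
    simp [h1, h2, mealDictA_lunch, mealDictA_dinner]
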